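-- pv_equiv track=rewrite | github.com/ZZOMING-K/coding-test-study | 프로그래머스/1/42840. 모의고사/모의고사.py | solution
-- ===== SOURCE A (Python) =====
-- def solution(answers):
--
--     pattern1 = [1,2,3,4,5]
--     pattern2 = [2,1,2,3,2,4,2,5]
--     pattern3 = [3,3,1,1,2,2,4,4,5,5]
--
--     score = [0,0,0]
--
--     for i in range(len(answers)) :
--         #5개의 답이 반복되므로
--         if answers[i] == pattern1[ i % len(pattern1) ] :
--             score[0] += 1
--         if answers[i] == pattern2[ i % len(pattern2)] :
--             score[1] += 1
--         if answers[i] == pattern3[ i % len(pattern3)] :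
--             score[2] += 1
--
--     result = []
--     for idx , s in enumerate(score) :
--         if s == max(score) :
--             result.append(idx+1)
--
--     return result
-- ===== SOURCE B (Python) =====
-- def solution(answers):
--     patterns = [[1, 2, 3, 4, 5], [2, 1, 2, 3, 2, 4, 2, 5], [3, 3, 1, 1, 2, 2, 4, 4, 5, 5]]
--     L = 40  # positions repeat with period lcm(5, 8, 10) = 40
--     # one pass: histogram of (position mod 40, answer) pairs
--     hist = {}
--     for i, a in enumerate(answers):
--         key = (i % L, a)
--         hist[key] = hist.get(key, 0) + 1
--     # each score is 40 table lookups; winners kept by a running max with ties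
--     best = -1
--     result = []
--     for idx, p in enumerate(patterns, 1):
--         s = sum(hist.get((r, p[r % len(p)]), 0) for r in range(L))
--         if s > best:
--             best, result = s, [idx]
--         elif s == best:
--             result.append(idx)
--     return result
-- ===== Notes on version B (the rewrite author's own statement) =====
-- stated objective: alternative
-- what changed: Replaces A's per-element loop that compares each answer against all three patterns and the max-then-filter selection by a one-pass histogram of (position mod 40, answer) pairs, scoring each pattern with 40 dictionary lookups and picking winners with a running max that keeps ties.
import Mathlib
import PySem

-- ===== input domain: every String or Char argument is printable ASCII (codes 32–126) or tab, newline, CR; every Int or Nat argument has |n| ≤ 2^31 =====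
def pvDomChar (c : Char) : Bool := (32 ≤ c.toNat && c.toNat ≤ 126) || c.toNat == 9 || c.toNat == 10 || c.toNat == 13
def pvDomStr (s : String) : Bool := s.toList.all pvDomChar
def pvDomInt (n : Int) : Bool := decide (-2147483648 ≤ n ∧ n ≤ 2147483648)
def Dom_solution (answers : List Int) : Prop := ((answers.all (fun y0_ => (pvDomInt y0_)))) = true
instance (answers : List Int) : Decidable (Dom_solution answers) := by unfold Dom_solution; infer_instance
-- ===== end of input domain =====

-- B replaces A's per-element loop that checks all three patterns plus the max-then-filter
-- selection by a one-pass (position mod 40, answer) histogram, 40 table lookups per pattern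
-- score, and a running-max-with-ties selection (alternative decomposition, same O(n)).

-- ===== PORT A =====
def solution (answers : List Int) : List Int :=
  let pattern1 : List Int := [1,2,3,4,5]
  let pattern2 : List Int := [2,1,2,3,2,4,2,5]
  let pattern3 : List Int := [3,3,1,1,2,2,4,4,5,5]
  -- for i in range(len(answers)): three independent 'if ... : score[k] += 1'
  let score :=
    (PySem.List.pyRange 0 (answers.length : Int) 1).foldl
      (fun (s : Int × Int × Int) i =>
        ((if PySem.List.pyGetD answers i 0 ==
              PySem.List.pyGetD pattern1 (PySem.Int.mod i (pattern1.length : Int)) 0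
           then s.1 + 1 else s.1),
         (if PySem.List.pyGetD answers i 0 ==
              PySem.List.pyGetD pattern2 (PySem.Int.mod i (pattern2.length : Int)) 0
           then s.2.1 + 1 else s.2.1),
         (if PySem.List.pyGetD answers i 0 ==
              PySem.List.pyGetD pattern3 (PySem.Int.mod i (pattern3.length : Int)) 0
           then s.2.2 + 1 else s.2.2)))
      (0, 0, 0)
  let scoreL : List Int := [score.1, score.2.1, score.2.2]
  -- for idx, s in enumerate(score): if s == max(score): result.append(idx+1)
  (PySem.List.enumerate scoreL 0).foldl
    (fun r q => if q.2 == (PySem.List.max? scoreL (fun x => x)).getD 0 then r ++ [q.1 + 1] else r)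
    []

-- ===== PORT B =====
def solution_alt (answers : List Int) : List Int :=
  let patterns : List (List Int) := [[1,2,3,4,5], [2,1,2,3,2,4,2,5], [3,3,1,1,2,2,4,4,5,5]]
  let L : Int := 40
  -- hist[(i % L, a)] = hist.get((i % L, a), 0) + 1
  let hist : PySem.Dict (Int × Int) Int :=
    (PySem.List.enumerate answers 0).foldl
      (fun d q =>
        let key := (PySem.Int.mod q.1 L, q.2)
        d.insert key (d.getD key 0 + 1))
      PySem.Dict.empty
  -- s = sum of 40 histogram lookups; running max keeping ties
  ((PySem.List.enumerate patterns 1).foldl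
    (fun (st : Int × List Int) q =>
      if ((PySem.List.pyRange 0 L 1).map
            (fun r => hist.getD (r, PySem.List.pyGetD q.2 (PySem.Int.mod r (q.2.length : Int)) 0) 0)).sum
          > st.1 then
        (((PySem.List.pyRange 0 L 1).map
            (fun r => hist.getD (r, PySem.List.pyGetD q.2 (PySem.Int.mod r (q.2.length : Int)) 0) 0)).sum, [q.1])
      else if ((PySem.List.pyRange 0 L 1).map
            (fun r => hist.getD (r, PySem.List.pyGetD q.2 (PySem.Int.mod r (q.2.length : Int)) 0) 0)).sum
          == st.1 then
        (st.1, st.2 ++ [q.1])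
      else st)
    (-1, ([] : List Int))).2

-- ===== PRECONDITION & SPEC =====
def Spec_solution (answers : List Int) (out : List Int) : Prop := out = solution_alt answers
instance (answers : List Int) (out : List Int) : Decidable (Spec_solution answers out) := by unfold Spec_solution; infer_instance

-- ===== CLAIM (what is proved, stated in full; the proofs are below) =====
def Claim_equal_solution : Prop := ∀ (answers : List Int), Dom_solution answers → Spec_solution answers (solution answers)

-- ===== LEMMAS AND PROOFS =====

theorem sum_ite_pair_notmem (pv : Int → Int) (q : Int × Int) (l : List Int) (h : q.1 ∉ l) :
    (l.map (fun r => if ((r, pv r) : Int × Int) == q then (1:Int) else 0)).sum = 0 := by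
  induction l with
  | nil => simp
  | cons r t ih =>
    simp only [List.map_cons, List.sum_cons]
    rw [if_neg, ih (fun hm => h (List.mem_cons_of_mem _ hm))]
    · simp
    · simp only [beq_iff_eq, Prod.ext_iff]
      rintro ⟨h1, -⟩
      exact h (h1 ▸ List.mem_cons_self)

theorem sum_ite_pair_mem (pv : Int → Int) (q1 q2 : Int) (l : List Int) (hnd : l.Nodup) :
    (l.map (fun r => if ((r, pv r) : Int × Int) == (q1, q2) then (1:Int) else 0)).sum
      = if q1 ∈ l ∧ q2 = pv q1 then 1 else 0 := by
  induction l with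
  | nil => simp
  | cons r t ih =>
    simp only [List.map_cons, List.sum_cons]
    rcases List.nodup_cons.mp hnd with ⟨hr, hndt⟩
    by_cases hq : r = q1
    · subst hq
      rw [sum_ite_pair_notmem pv (r, q2) t hr]
      by_cases hv : pv r = q2
      · simp [hv]
      · rw [if_neg (by simp [Prod.ext_iff, hv]), if_neg (by rintro ⟨-, h2⟩; exact hv h2.symm)]
        simp
    · rw [if_neg (by simp only [beq_iff_eq, Prod.ext_iff]; rintro ⟨h1, -⟩; exact hq h1)]
      rw [ih hndt]
      have : (q1 ∈ r :: t) ↔ (q1 ∈ t) := by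
        rw [List.mem_cons]; exact or_iff_right (fun h => hq h.symm)
      simp [this]

theorem sum_count_residues (ks : List (Int × Int)) (pv : Int → Int)
    (h : ∀ x ∈ ks, 0 ≤ x.1 ∧ x.1 < 40) :
    ((PySem.List.pyRange 0 40 1).map (fun r => ((ks.count (r, pv r) : Nat) : Int))).sum
      = (ks.countP (fun x => x.2 == pv x.1) : Int) := by
  induction ks with
  | nil => simp
  | cons q t ih =>
    have hrw : (fun r => ((List.count ((r, pv r)) (q :: t) : Nat) : Int))
        = fun r => ((List.count ((r, pv r)) t : Nat) : Int)
            + (if ((r, pv r) : Int × Int) == q then (1:Int) else 0) := by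
      funext r
      rw [List.count_cons]
      push_cast
      split_ifs with h1 h2 h2
      · rfl
      · exact absurd (beq_iff_eq.mpr (beq_iff_eq.mp h1).symm) (by simpa using h2)
      · exact absurd (beq_iff_eq.mpr (beq_iff_eq.mp h2).symm) (by simpa using h1)
      · rfl
    rw [hrw, PySem.List.sum_map_add_int,
        ih (fun x hx => h x (List.mem_cons_of_mem _ hx)),
        sum_ite_pair_mem pv q.1 q.2 (PySem.List.pyRange 0 40 1) (PySem.List.nodup_pyRange_one 0 40)]
    have hq := h q List.mem_cons_self
    have hmem : q.1 ∈ PySem.List.pyRange 0 40 1 := by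
      rw [PySem.List.mem_pyRange_one]; exact ⟨hq.1, hq.2⟩
    rw [List.countP_cons]
    by_cases hv : q.2 = pv q.1
    · simp [hmem, hv]
    · simp only [hmem, true_and, hv, if_false]
      rw [if_neg (by simp [hv])]
      simp

def matchCnt (answers p : List Int) : Int :=
  ((PySem.List.enumerate answers 0).countP
    (fun q => q.2 == PySem.List.pyGetD p (PySem.Int.mod q.1 (p.length : Int)) 0) : Int)

theorem enumerate_fst_nonneg {answers : List Int} {x : Int × Int}
    (hx : x ∈ PySem.List.enumerate answers 0) : 0 ≤ x.1 := by
  rw [PySem.List.enumerate_eq_map_pyRange answers 0] at hx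
  rcases List.mem_map.mp hx with ⟨j, hj, rfl⟩
  exact (PySem.List.mem_pyRange_one.mp hj).1

theorem score_eq (answers p : List Int) (hlen : 0 < p.length) (hdvd : ((p.length : Int)) ∣ 40) :
    ((PySem.List.pyRange 0 40 1).map
      (fun r => (PySem.Dict.counter
          ((PySem.List.enumerate answers 0).map (fun q => (PySem.Int.mod q.1 40, q.2)))).getD
        (r, PySem.List.pyGetD p (PySem.Int.mod r (p.length : Int)) 0) 0)).sum
    = matchCnt answers p := by
  simp only [PySem.Dict.getD_counter]
  rw [sum_count_residues _ (fun r => PySem.List.pyGetD p (PySem.Int.mod r (p.length : Int)) 0)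
      (by
        intro x hx
        rcases List.mem_map.mp hx with ⟨y, hy, rfl⟩
        simp only [PySem.Int.mod_eq_emod_of_pos (by norm_num : (0:Int) < 40)]
        exact ⟨Int.emod_nonneg _ (by norm_num), Int.emod_lt_of_pos _ (by norm_num)⟩)]
  rw [List.countP_map]
  unfold matchCnt
  congr 1
  apply List.countP_congr
  intro x hx
  have h0 : 0 ≤ x.1 := enumerate_fst_nonneg hx
  have hl : (0:Int) < (p.length : Int) := by exact_mod_cast hlen
  simp only [Function.comp]
  rw [PySem.Int.mod_eq_emod_of_pos (by norm_num : (0:Int) < 40),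
      PySem.Int.mod_eq_emod_of_pos hl, PySem.Int.mod_eq_emod_of_pos hl,
      Int.emod_emod_of_dvd _ hdvd]

set_option maxHeartbeats 1000000 in
theorem select3 (sc : List Int → Int) (P1 P2 P3 : List Int) (a b c : Int)
    (h1 : sc P1 = a) (h2 : sc P2 = b) (h3 : sc P3 = c)
    (ha : 0 ≤ a) (hb : 0 ≤ b) (hc : 0 ≤ c) :
    (PySem.List.enumerate ([a, b, c] : List Int) 0).foldl
      (fun r q => if q.2 == (PySem.List.max? ([a, b, c] : List Int) (fun x => x)).getD 0
                  then r ++ [q.1 + 1] else r) []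
    = ((PySem.List.enumerate ([P1, P2, P3] : List (List Int)) 1).foldl
        (fun (st : Int × List Int) q =>
          if sc q.2 > st.1 then (sc q.2, [q.1])
          else if sc q.2 == st.1 then (st.1, st.2 ++ [q.1])
          else st)
        (-1, ([] : List Int))).2 := by
  rw [PySem.List.max?_id_cons]
  have hm : ([b, c] : List Int).foldl max a = max (max a b) c := by
    simp [List.foldl_cons, List.foldl_nil]
  simp only [PySem.List.enumerate_cons, PySem.List.enumerate_nil, List.foldl_cons,
    List.foldl_nil, Option.getD_some, hm, h1, h2, h3, beq_iff_eq, gt_iff_lt, List.nil_append]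
  split_ifs <;> first | rfl | omega

theorem foldl3_split {α : Type} (p1 p2 p3 : α → Bool) (l : List α) :
    ∀ s0 s1 s2 : Int,
      l.foldl
        (fun (s : Int × Int × Int) q =>
          ((if p1 q then s.1 + 1 else s.1),
           (if p2 q then s.2.1 + 1 else s.2.1),
           (if p3 q then s.2.2 + 1 else s.2.2)))
        (s0, s1, s2)
      = (s0 + (l.countP p1 : Int), s1 + (l.countP p2 : Int), s2 + (l.countP p3 : Int)) := by
  induction l with
  | nil => intro s0 s1 s2; simp
  | cons x t ih =>
    intro s0 s1 s2
    simp only [List.foldl_cons, List.countP_cons]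
    rw [ih]
    split_ifs <;> simp_all <;> omega

set_option maxHeartbeats 2000000 in
theorem main_eq (answers : List Int) : solution answers = solution_alt answers := by
  have hB : (PySem.List.enumerate answers 0).foldl
        (fun (d : PySem.Dict (Int × Int) Int) (q : Int × Int) =>
          let key := (PySem.Int.mod q.1 40, q.2)
          d.insert key (d.getD key 0 + 1))
        PySem.Dict.empty
      = PySem.Dict.counter
          ((PySem.List.enumerate answers 0).map (fun q => (PySem.Int.mod q.1 40, q.2))) := by
    rw [← PySem.Dict.foldl_insert_getD_add_one_eq_counter]
    exact (List.foldl_map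
      (f := fun q : Int × Int => (PySem.Int.mod q.1 40, q.2))
      (g := fun (d : PySem.Dict (Int × Int) Int) (k : Int × Int) => d.insert k (d.getD k 0 + 1))
      (l := PySem.List.enumerate answers 0) (init := PySem.Dict.empty)).symm
  have key : (PySem.List.pyRange 0 (answers.length : Int) 1).foldl
        (fun (s : Int × Int × Int) i =>
          ((if PySem.List.pyGetD answers i 0 ==
                PySem.List.pyGetD ([1,2,3,4,5] : List Int) (PySem.Int.mod i (([1,2,3,4,5] : List Int).length : Int)) 0
             then s.1 + 1 else s.1),
           (if PySem.List.pyGetD answers i 0 ==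
                PySem.List.pyGetD ([2,1,2,3,2,4,2,5] : List Int) (PySem.Int.mod i (([2,1,2,3,2,4,2,5] : List Int).length : Int)) 0
             then s.2.1 + 1 else s.2.1),
           (if PySem.List.pyGetD answers i 0 ==
                PySem.List.pyGetD ([3,3,1,1,2,2,4,4,5,5] : List Int) (PySem.Int.mod i (([3,3,1,1,2,2,4,4,5,5] : List Int).length : Int)) 0
             then s.2.2 + 1 else s.2.2)))
        (0, 0, 0)
      = (matchCnt answers [1,2,3,4,5], matchCnt answers [2,1,2,3,2,4,2,5],
         matchCnt answers [3,3,1,1,2,2,4,4,5,5]) := by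
    have e1 : (PySem.List.enumerate answers 0).foldl
        (fun (s : Int × Int × Int) (q : Int × Int) =>
          ((if q.2 == PySem.List.pyGetD ([1,2,3,4,5] : List Int) (PySem.Int.mod q.1 (([1,2,3,4,5] : List Int).length : Int)) 0
             then s.1 + 1 else s.1),
           (if q.2 == PySem.List.pyGetD ([2,1,2,3,2,4,2,5] : List Int) (PySem.Int.mod q.1 (([2,1,2,3,2,4,2,5] : List Int).length : Int)) 0
             then s.2.1 + 1 else s.2.1),
           (if q.2 == PySem.List.pyGetD ([3,3,1,1,2,2,4,4,5,5] : List Int) (PySem.Int.mod q.1 (([3,3,1,1,2,2,4,4,5,5] : List Int).length : Int)) 0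
             then s.2.2 + 1 else s.2.2)))
        (0, 0, 0)
        = (PySem.List.pyRange 0 (answers.length : Int) 1).foldl
        (fun (s : Int × Int × Int) i =>
          ((if PySem.List.pyGetD answers i 0 ==
                PySem.List.pyGetD ([1,2,3,4,5] : List Int) (PySem.Int.mod i (([1,2,3,4,5] : List Int).length : Int)) 0
             then s.1 + 1 else s.1),
           (if PySem.List.pyGetD answers i 0 ==
                PySem.List.pyGetD ([2,1,2,3,2,4,2,5] : List Int) (PySem.Int.mod i (([2,1,2,3,2,4,2,5] : List Int).length : Int)) 0
             then s.2.1 + 1 else s.2.1),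
           (if PySem.List.pyGetD answers i 0 ==
                PySem.List.pyGetD ([3,3,1,1,2,2,4,4,5,5] : List Int) (PySem.Int.mod i (([3,3,1,1,2,2,4,4,5,5] : List Int).length : Int)) 0
             then s.2.2 + 1 else s.2.2)))
        (0, 0, 0) := by
      rw [PySem.List.enumerate_eq_map_pyRange answers 0, List.foldl_map]
      simp only [PySem.List.len_eq]
    rw [← e1, foldl3_split]
    simp only [zero_add]
    rfl
  unfold solution solution_alt
  simp only [key, hB]
  have hs := (select3
    (fun p => ((PySem.List.pyRange 0 40 1).map
      (fun r => (PySem.Dict.counter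
          ((PySem.List.enumerate answers 0).map (fun q => (PySem.Int.mod q.1 40, q.2)))).getD
        (r, PySem.List.pyGetD p (PySem.Int.mod r (p.length : Int)) 0) 0)).sum)
    [1,2,3,4,5] [2,1,2,3,2,4,2,5] [3,3,1,1,2,2,4,4,5,5]
    (matchCnt answers [1,2,3,4,5]) (matchCnt answers [2,1,2,3,2,4,2,5])
    (matchCnt answers [3,3,1,1,2,2,4,4,5,5])
    (score_eq answers [1,2,3,4,5] (by norm_num) (by norm_num))
    (score_eq answers [2,1,2,3,2,4,2,5] (by norm_num) (by norm_num))
    (score_eq answers [3,3,1,1,2,2,4,4,5,5] (by norm_num) (by norm_num))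
    (Int.natCast_nonneg _) (Int.natCast_nonneg _) (Int.natCast_nonneg _))
  rw [hs]

-- ===== VERDICT (by name: the statement is the Claim_ definition above) =====
theorem solution_spec : Claim_equal_solution := by
  intro answers _
  unfold Spec_solution
  exact main_eq answers
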